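-- pv_equiv track=rewrite | github.com/ozcansid000/Simplex-Algorithm-Term-Project | Optimization for business.py | negsB
-- ===== SOURCE A (Python) =====
-- def negsB(matrix):
--     rows, cols = len(matrix), len(matrix[0])
--     mFinal = 1000
--     rowFinal = None
--     for row in range(rows):
--         m = min(matrix[row])
--         if m<mFinal:
--             mFinal = m
--             if m<=0:
--                 rowFinal = row
--     return rowFinal
-- ===== SOURCE B (Python) =====
-- def negsB(matrix):
--     rows, cols = len(matrix), len(matrix[0])
--     mins = [min(row) for row in matrix]
--     m = min(mins)
--     return mins.index(m) if m <= 0 else None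
-- ===== Notes on version B (the rewrite author's own statement) =====
-- stated objective: simpler
-- what changed: A's single fused pass (running minimum with conditional row-index update) is replaced by build-row-mins table, global min reduce, then first-index lookup.
import Mathlib
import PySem

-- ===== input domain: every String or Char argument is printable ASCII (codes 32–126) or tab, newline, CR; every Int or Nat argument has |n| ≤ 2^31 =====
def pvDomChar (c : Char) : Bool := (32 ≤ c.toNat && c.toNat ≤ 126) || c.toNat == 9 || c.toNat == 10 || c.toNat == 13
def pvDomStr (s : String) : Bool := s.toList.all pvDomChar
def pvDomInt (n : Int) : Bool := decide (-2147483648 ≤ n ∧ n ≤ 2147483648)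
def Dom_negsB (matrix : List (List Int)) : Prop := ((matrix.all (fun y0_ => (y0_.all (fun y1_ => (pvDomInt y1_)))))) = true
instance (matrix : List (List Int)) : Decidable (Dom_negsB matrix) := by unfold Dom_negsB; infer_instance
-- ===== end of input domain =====

-- B replaces A's fused running-minimum loop by a row-mins table + global min + first-index lookup (simpler decomposition, same cost).


-- ===== PORT A =====
-- the loop step: state (mFinal, rowFinal), element (row index, the row)
def negsBStep (s : Int × Option Int) (jr : Int × List Int) : Int × Option Int :=
  let m := (PySem.List.min? jr.2 (fun x => x)).getD 0   -- min(matrix[row]); row ≠ [] inside Pre_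
  if m < s.1 then (m, if m ≤ 0 then some jr.1 else s.2) else s

def negsB (matrix : List (List Int)) : Option Int :=
  let rows : Int := matrix.length
  -- 'cols = len(matrix[0])' only raises on an empty matrix (excluded by Pre_); value unused
  let st := (PySem.List.pyRange 0 rows 1).foldl
    (fun s row => negsBStep s (row, PySem.List.pyGetD matrix row []))
    ((1000 : Int), (none : Option Int))
  st.2

-- ===== PORT B =====
def negsB_alt (matrix : List (List Int)) : Option Int :=
  -- 'cols = len(matrix[0])' only raises on an empty matrix (excluded by Pre_); value unused
  let mins := matrix.map (fun row => (PySem.List.min? row (fun x => x)).getD 0)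
  match PySem.List.min? mins (fun x => x) with
  | none => none
  | some m => if m ≤ 0 then some (((PySem.List.index? mins m).getD 0 : Nat) : Int) else none

-- ===== PRECONDITION & SPEC =====
-- Pre_ excludes exactly the inputs on which A raises: an empty matrix (IndexError on matrix[0])
-- and any empty row (ValueError from min([])).
def Pre_negsB (matrix : List (List Int)) : Prop := matrix ≠ [] ∧ ∀ r ∈ matrix, r ≠ []
instance (matrix : List (List Int)) : Decidable (Pre_negsB matrix) := by unfold Pre_negsB; infer_instance
def pvWitness_negsB : List (List Int) := [[3, -1], [0, 2]]
def Spec_negsB (matrix : List (List Int)) (out : Option Int) : Prop := out = negsB_alt matrix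
instance (matrix : List (List Int)) (out : Option Int) : Decidable (Spec_negsB matrix out) := by unfold Spec_negsB; infer_instance

-- ===== CLAIM (what is proved, stated in full; the proofs are below) =====
def Claim_equal_negsB : Prop := ∀ (matrix : List (List Int)), Dom_negsB matrix → Pre_negsB matrix → Spec_negsB matrix (negsB matrix)

-- ===== LEMMAS AND PROOFS =====

-- A's loop result, characterised: first index of the global row-min M (offset by s) when M < mF and M ≤ 0
def runSpec (ms : List Int) (s mF : Int) (rF : Option Int) : Option Int :=
  match PySem.List.min? ms (fun x => x) with
  | none => rF
  | some M => if M < mF ∧ M ≤ 0 then some (s + ((PySem.List.index? ms M).getD 0 : Nat)) else rF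

theorem foldl_min_min (l : List Int) (a b : Int) :
    l.foldl min (min a b) = min a (l.foldl min b) := by
  induction l generalizing b with
  | nil => simp
  | cons x t ih => simp [List.foldl, min_assoc, ih]

theorem min?_id_cons_cons (m x : Int) (t : List Int) :
    PySem.List.min? (m :: x :: t) (fun y => y) =
      some (min m ((PySem.List.min? (x :: t) (fun y => y)).getD 0)) := by
  rw [PySem.List.min?_id_cons, PySem.List.min?_id_cons]
  simp [List.foldl, foldl_min_min]

theorem key_lemma (rows : List (List Int)) (s mF : Int) (rF : Option Int) :
    ((PySem.List.enumerate rows s).foldl negsBStep (mF, rF)).2 =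
      runSpec (rows.map (fun r => (PySem.List.min? r (fun x => x)).getD 0)) s mF rF := by
  induction rows generalizing s mF rF with
  | nil => simp [PySem.List.enumerate_nil, runSpec, PySem.List.min?]
  | cons r t ih =>
    rw [PySem.List.enumerate_cons]
    set m := (PySem.List.min? r (fun x => x)).getD 0 with hm
    have hstep : negsBStep (mF, rF) (s, r) =
        (if m < mF then m else mF, if m < mF then (if m ≤ 0 then some s else rF) else rF) := by
      simp only [negsBStep, ← hm]
      split_ifs <;> simp_all
    rw [List.foldl_cons, hstep, ih]
    simp only [List.map_cons, ← hm]
    cases ht : t.map (fun r => (PySem.List.min? r (fun x => x)).getD 0) with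
    | nil =>
      have h0 : PySem.List.min? ([] : List Int) (fun x => x) = none :=
        (PySem.List.min?_eq_none_iff _ _).mpr rfl
      have h1 : PySem.List.min? [m] (fun x => x) = some m := by
        rw [PySem.List.min?_id_cons]; simp
      simp only [runSpec, h0, h1, PySem.List.index?_cons_self, Option.getD_some,
        Nat.cast_zero, add_zero]
      split_ifs <;> first | rfl | omega
    | cons x mt =>
      have hne' : (x :: mt) ≠ [] := by simp
      obtain ⟨Mr, hMr⟩ : ∃ Mr, PySem.List.min? (x :: mt) (fun y => y) = some Mr := by
        cases h : PySem.List.min? (x :: mt) (fun y => y) with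
        | none => exact absurd ((PySem.List.min?_eq_none_iff _ _).mp h) hne'
        | some Mr => exact ⟨Mr, rfl⟩
      have hmem : Mr ∈ x :: mt := PySem.List.min?_mem hMr
      have hM : PySem.List.min? (m :: x :: mt) (fun y => y) = some (min m Mr) := by
        rw [min?_id_cons_cons, hMr, Option.getD_some]
      simp only [runSpec, hMr, hM]
      by_cases hA : Mr < m
      case neg =>
        have hmin : min m Mr = m := min_eq_left (by omega)
        rw [hmin, PySem.List.index?_cons_self]
        simp only [Option.getD_some, Nat.cast_zero, add_zero]
        split_ifs <;> first | rfl | omega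
      case pos =>
        have hne : m ≠ Mr := by omega
        have hmin : min m Mr = Mr := min_eq_right (le_of_lt hA)
        obtain ⟨k, hk⟩ : ∃ k, PySem.List.index? (x :: mt) Mr = some k := by
          have := PySem.List.index?_isSome_iff (xs := x :: mt) (v := Mr)
          exact Option.isSome_iff_exists.mp (this.mpr hmem)
        rw [hmin, PySem.List.index?_cons_of_ne _ hne, hk]
        simp only [Option.map_some, Option.getD_some]
        split_ifs <;> first
          | omega
          | rfl
          | (congr 1; push_cast; ring)

theorem negsB_eq_run (matrix : List (List Int)) :
    negsB matrix = runSpec (matrix.map (fun r => (PySem.List.min? r (fun x => x)).getD 0)) 0 1000 none := by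
  have h := key_lemma matrix 0 1000 none
  rw [PySem.List.enumerate_eq_map_pyRange matrix ([] : List Int), List.foldl_map] at h
  simpa [negsB, PySem.List.len] using h

-- ===== VERDICT (by name: the statement is the Claim_ definition above) =====
theorem negsB_spec : Claim_equal_negsB := by
  intro matrix _ hpre
  unfold Spec_negsB
  rw [negsB_eq_run]
  unfold negsB_alt runSpec
  cases hms : PySem.List.min? (matrix.map (fun r => (PySem.List.min? r (fun x => x)).getD 0)) (fun x => x) with
  | none =>
    exact absurd (List.map_eq_nil_iff.mp ((PySem.List.min?_eq_none_iff _ _).mp hms)) hpre.1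
  | some M =>
    simp only [hms]
    split_ifs <;> first | simp | omega
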